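-- pv_equiv track=rewrite | github.com/DragunWF/Competitive-Programming | CodeWars/python/7_kyu/mutate_my_string.py | mutate_my_strings
-- ===== SOURCE A (Python) =====
-- def mutate_my_strings(s1: str, s2: str) -> str:
--     char_list_s1 = [*s1]
--     output = [s1]
--     for i, char in enumerate(s2):
--         if char_list_s1[i] == s2[i]:
--             continue
--
--         char_list_s1[i] = char
--         converted_str = "".join(char_list_s1)
--         output.append(converted_str)
--
--         if converted_str == s2:
--             break
--
--     return "\n".join(output) + "\n"
-- ===== SOURCE B (Python) =====
-- def mutate_my_strings(s1: str, s2: str) -> str: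
--     output = [s1]
--     for i in range(len(s2)):
--         if s1[i] != s2[i]:
--             output.append(s2[:i + 1] + s1[i + 1:])
--     return "\n".join(output) + "\n"
-- ===== Notes on version B (the rewrite author's own statement) =====
-- stated objective: simpler
-- what changed: B drops A's mutable char-list accumulator and break: it emits each step as the closed-form slice s2[:i+1]+s1[i+1:] whenever s1[i]!=s2[i], in a plain stateless loop.
import Mathlib
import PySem

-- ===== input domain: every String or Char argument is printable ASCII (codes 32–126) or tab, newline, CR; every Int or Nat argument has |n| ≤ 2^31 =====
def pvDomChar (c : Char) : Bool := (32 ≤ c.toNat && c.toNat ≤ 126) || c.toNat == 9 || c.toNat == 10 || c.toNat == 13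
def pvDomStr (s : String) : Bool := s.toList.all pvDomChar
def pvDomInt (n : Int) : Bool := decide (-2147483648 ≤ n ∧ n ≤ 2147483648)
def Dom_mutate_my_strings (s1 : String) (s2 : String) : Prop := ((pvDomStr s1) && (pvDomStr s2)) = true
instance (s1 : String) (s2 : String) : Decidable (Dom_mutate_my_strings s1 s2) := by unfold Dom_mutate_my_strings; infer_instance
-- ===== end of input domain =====

-- B replaces A's mutable char-list accumulator and break with a stateless loop emitting the
-- closed-form slice s2[:i+1] + s1[i+1:] at each mismatch (objective: simpler).

-- ===== PORT A =====
-- A's loop 'for i, char in enumerate(s2)' with early break; char_list_s1[i] raises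
-- IndexError when i ≥ len(s1) (the 'none' branch; such inputs are excluded by Pre_).
def pvGoA (l2 : List Char) (i : Nat) (cl : List Char) (out : List (List Char)) :
    List (List Char) :=
  if h : i < l2.length then
    let c := l2[i]
    match PySem.List.pyGet? cl (i : Int) with
    | none => out  -- Python raises IndexError here (outside Pre_)
    | some a =>
      if a == c then pvGoA l2 (i + 1) cl out
      else
        let cl' := cl.set i c
        let out' := out ++ [cl']
        if cl' == l2 then out' else pvGoA l2 (i + 1) cl' out'
  else out
termination_by l2.length - i

def mutate_my_strings (s1 : String) (s2 : String) : String :=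
  String.mk (PySem.Chars.join ['\n'] (pvGoA s2.toList 0 s1.toList [s1.toList]) ++ ['\n'])

-- ===== PORT B =====
-- Source B: for i in range(len(s2)): if s1[i] != s2[i]: append s2[:i+1] + s1[i+1:]
-- s1[i]/s2[i] ported by pyGet? (none = IndexError, outside Pre_); the slices are take/drop.
def pvStepB (l1 l2 : List Char) (out : List (List Char)) (i : Nat) : List (List Char) :=
  match PySem.List.pyGet? l1 (i : Int), PySem.List.pyGet? l2 (i : Int) with
  | some a, some b =>
      if a != b then out ++ [l2.take (i + 1) ++ l1.drop (i + 1)] else out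
  | _, _ => out  -- IndexError in Python (outside Pre_)

def mutate_my_strings_alt (s1 : String) (s2 : String) : String :=
  String.mk (PySem.Chars.join ['\n']
    ((List.range s2.toList.length).foldl (pvStepB s1.toList s2.toList) [s1.toList]) ++ ['\n'])

-- ===== PRECONDITION & SPEC =====
-- Pre_ excludes len(s2) > len(s1): there BOTH A and B raise IndexError (s1 indexed at len(s1)).
def Pre_mutate_my_strings (s1 : String) (s2 : String) : Prop :=
  s2.toList.length ≤ s1.toList.length
instance (s1 : String) (s2 : String) : Decidable (Pre_mutate_my_strings s1 s2) := by
  unfold Pre_mutate_my_strings; infer_instance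

def pvWitness_mutate_my_strings : String × String := ("hello", "hxllo")

def Spec_mutate_my_strings (s1 : String) (s2 : String) (out : String) : Prop :=
  out = mutate_my_strings_alt s1 s2
instance (s1 : String) (s2 : String) (out : String) :
    Decidable (Spec_mutate_my_strings s1 s2 out) := by
  unfold Spec_mutate_my_strings; infer_instance

-- ===== CLAIM (what is proved, stated in full; the proofs are below) =====
def Claim_equal_mutate_my_strings : Prop := ∀ (s1 : String) (s2 : String), Dom_mutate_my_strings s1 s2 → Pre_mutate_my_strings s1 s2 → Spec_mutate_my_strings s1 s2 (mutate_my_strings s1 s2)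

-- ===== LEMMAS AND PROOFS =====

-- A's char-list state after processing indices < i is the hybrid  l2.take i ++ l1.drop i.
-- Its element at index i is still l1[i]:
lemma pvHybrid_get? (l1 l2 : List Char) (i : Nat) (h1 : i < l1.length) (h2 : i ≤ l2.length) :
    (l2.take i ++ l1.drop i)[i]? = some l1[i] := by
  rw [List.getElem?_append_right (by simp)]
  simp [Nat.min_eq_left h2, List.getElem?_drop, List.getElem?_eq_getElem h1]

lemma pvTake_snoc (l2 : List Char) (i : Nat) (h2 : i < l2.length) :
    l2.take (i + 1) = l2.take i ++ [l2[i]] := by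
  rw [List.take_add_one]
  simp [List.getElem?_eq_getElem h2]

-- setting index i of the hybrid yields the next hybrid
lemma pvHybrid_set (l1 l2 : List Char) (i : Nat) (h1 : i < l1.length) (h2 : i < l2.length) :
    (l2.take i ++ l1.drop i).set i (l2[i]) = l2.take (i + 1) ++ l1.drop (i + 1) := by
  rw [List.set_append_right i (l2[i]) (by simp)]
  have ht : (l2.take i).length = i := by simp; omega
  rw [ht, Nat.sub_self, List.drop_eq_getElem_cons h1, List.set_cons_zero, pvTake_snoc l2 i h2,
    List.append_assoc]
  rfl

-- when the chars at i agree, the hybrid is unchanged by moving to i+1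
lemma pvHybrid_same (l1 l2 : List Char) (i : Nat) (h1 : i < l1.length) (h2 : i < l2.length)
    (heq : l1[i] = l2[i]) :
    l2.take i ++ l1.drop i = l2.take (i + 1) ++ l1.drop (i + 1) := by
  rw [List.drop_eq_getElem_cons h1, heq, pvTake_snoc l2 i h2, List.append_assoc]
  rfl

-- B's step at an in-range index, written with getElem
lemma pvStepB_eq (l1 l2 : List Char) (i : Nat) (h1 : i < l1.length) (h2 : i < l2.length)
    (out : List (List Char)) :
    pvStepB l1 l2 out i =
      if l1[i] = l2[i] then out else out ++ [l2.take (i + 1) ++ l1.drop (i + 1)] := by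
  unfold pvStepB
  rw [PySem.List.pyGet?_natCast, PySem.List.pyGet?_natCast,
    List.getElem?_eq_getElem h1, List.getElem?_eq_getElem h2]
  by_cases heq : l1[i] = l2[i] <;> simp [heq]

-- a fold over indices where each step is a no-op returns its accumulator
lemma pvFold_noop (l1 l2 : List Char) (L : List Nat)
    (h : ∀ j ∈ L, ∀ o, pvStepB l1 l2 o j = o) (out : List (List Char)) :
    L.foldl (pvStepB l1 l2) out = out := by
  induction L generalizing out with
  | nil => rfl
  | cons j L ih =>
      simp only [List.foldl_cons, h j (by simp)]
      exact ih (fun j' hj' o => h j' (by simp [hj']) o) out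

-- main invariant: from index i with the hybrid state, A's loop equals B's remaining fold
-- (A's break fires only when the hybrid equals l2, and then every later step of B is a no-op)
lemma pvMain (l1 l2 : List Char) (hle : l2.length ≤ l1.length) :
    ∀ (k i : Nat), i + k = l2.length →
    ∀ (out : List (List Char)),
      pvGoA l2 i (l2.take i ++ l1.drop i) out =
        (List.range' i k).foldl (pvStepB l1 l2) out := by
  intro k
  induction k with
  | zero =>
      intro i hi out
      rw [pvGoA]
      simp [show ¬ i < l2.length by omega]
  | succ k ih =>
      intro i hi out
      have hi2 : i < l2.length := by omega
      have hi1 : i < l1.length := by omega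
      have hget : PySem.List.pyGet? (l2.take i ++ l1.drop i) (i : Int) = some l1[i] := by
        rw [PySem.List.pyGet?_natCast]
        exact pvHybrid_get? l1 l2 i hi1 (le_of_lt hi2)
      have hrange : List.range' i (k + 1) = i :: List.range' (i + 1) k := List.range'_succ
      rw [hrange, List.foldl_cons, pvStepB_eq l1 l2 i hi1 hi2, pvGoA, dif_pos hi2]
      simp only [hget]
      by_cases heq : l1[i] = l2[i]
      · rw [if_pos heq, if_pos (by simp [heq]), pvHybrid_same l1 l2 i hi1 hi2 heq]
        exact ih (i + 1) (by omega) out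
      · rw [if_neg heq, if_neg (by simp [heq]), pvHybrid_set l1 l2 i hi1 hi2]
        by_cases hdone : l2.take (i + 1) ++ l1.drop (i + 1) = l2
        · rw [if_pos (by simp [hdone])]
          have hdrop : l1.drop (i + 1) = l2.drop (i + 1) := by
            have h2 : l2.take (i + 1) ++ l2.drop (i + 1) = l2 := List.take_append_drop _ _
            exact List.append_cancel_left (hdone.trans h2.symm)
          refine (pvFold_noop l1 l2 _ ?_ _).symm
          intro j hj o
          rw [List.mem_range'] at hj
          obtain ⟨m, hm, hj2⟩ := hj
          have hj3 : j < l2.length := by omega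
          have hj4 : j < l1.length := by omega
          have hagree : l1[j] = l2[j] := by
            have h5 := congrArg (fun l => l[j - (i + 1)]?) hdrop
            simp only [List.getElem?_drop, show i + 1 + (j - (i + 1)) = j by omega] at h5
            rw [List.getElem?_eq_getElem hj4, List.getElem?_eq_getElem hj3] at h5
            exact Option.some.inj h5
          rw [pvStepB_eq l1 l2 j hj4 hj3, if_pos hagree]
        · rw [if_neg (by simp [hdone])]
          exact ih (i + 1) (by omega) _

-- ===== VERDICT (by name: the statement is the Claim_ definition above) =====
theorem mutate_my_strings_spec : Claim_equal_mutate_my_strings := by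
  intro s1 s2 _ hpre
  unfold Spec_mutate_my_strings mutate_my_strings mutate_my_strings_alt
  rw [List.range_eq_range']
  have h := pvMain s1.toList s2.toList hpre s2.toList.length 0 (by omega) [s1.toList]
  simp only [List.take_zero, List.drop_zero, List.nil_append] at h
  rw [h]
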